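-- pv_equiv track=rewrite | github.com/ajnirp/binarysearch | a-before-b.py | solve
-- ===== SOURCE A (Python) =====
-- def solve(s):
--     first_b = -1
--     for i in range(0, len(s)):
--         if s[i] == 'B':
--             first_b = i
--             break
--     if first_b == -1:
--         return 0
--     return sum(s[k] == 'A' for k in range(first_b+1, len(s)))
-- ===== SOURCE B (Python) =====
-- def solve(s):
--     seen_b = False
--     count = 0
--     for c in s:
--         if seen_b and c == 'A':
--             count += 1
--         elif c == 'B':
--             seen_b = True
--     return count
-- ===== Notes on version B (the rewrite author's own statement) =====
-- stated objective: simpler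
-- what changed: Replaces A's two phases (index scan for the first 'B', then an index-range sum of 'A's) with a single element-wise pass carrying a seen_b flag and a counter.
import Mathlib
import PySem

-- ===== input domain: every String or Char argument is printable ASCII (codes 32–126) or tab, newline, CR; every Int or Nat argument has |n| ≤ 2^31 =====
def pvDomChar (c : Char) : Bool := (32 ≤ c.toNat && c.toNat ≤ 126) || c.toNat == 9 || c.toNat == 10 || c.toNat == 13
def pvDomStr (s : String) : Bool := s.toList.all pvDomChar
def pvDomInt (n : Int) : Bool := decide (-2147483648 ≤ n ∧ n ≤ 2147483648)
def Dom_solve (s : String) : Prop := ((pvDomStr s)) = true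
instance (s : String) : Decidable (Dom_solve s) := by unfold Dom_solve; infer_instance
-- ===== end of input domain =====

-- B fuses A's two phases (find first 'B' by index, then range-sum 'A's) into one element pass
-- carrying a seen-flag and a counter; objective: simpler.


-- ===== PORT A =====
-- the 'for i in range(...): if s[i]=='B': first_b=i; break' loop (early exit = recursion over the index list)
def solveFindB (l : List Char) : List Int → Int
  | [] => -1
  | i :: rest => if PySem.List.pyGetD l i ' ' = 'B' then i else solveFindB l rest

def solve (s : String) : Int :=
  let l := s.toList
  let first_b := solveFindB l (PySem.List.pyRange 0 (l.length : Int) 1)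
  if first_b = -1 then 0
  else ((PySem.List.pyRange (first_b + 1) (l.length : Int) 1).map
          (fun k => if PySem.List.pyGetD l k ' ' = 'A' then (1 : Int) else 0)).sum

-- ===== PORT B =====
def solveAltStep (st : Bool × Int) (c : Char) : Bool × Int :=
  if st.1 = true ∧ c = 'A' then (st.1, st.2 + 1)
  else if c = 'B' then (true, st.2)
  else st

def solve_alt (s : String) : Int :=
  (s.toList.foldl solveAltStep (false, 0)).2

-- ===== PRECONDITION & SPEC =====
def Spec_solve (s : String) (out : Int) : Prop := out = solve_alt s
instance (s : String) (out : Int) : Decidable (Spec_solve s out) := by unfold Spec_solve; infer_instance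

-- ===== CLAIM (what is proved, stated in full; the proofs are below) =====
def Claim_equal_solve : Prop := ∀ (s : String), Dom_solve s → Spec_solve s (solve s)

-- ===== LEMMAS AND PROOFS =====

-- number of 'A's, as an Int
def countA (l : List Char) : Int := (l.countP (· = 'A') : Int)

-- 'A's strictly after the first 'B'
def gAfterB : List Char → Int
  | [] => 0
  | c :: t => if c = 'B' then countA t else gAfterB t

theorem countA_cons (c : Char) (t : List Char) :
    countA (c :: t) = (if c = 'A' then 1 else 0) + countA t := by
  by_cases h : c = 'A' <;> simp [countA, h]; omega

theorem alt_foldl_true (l : List Char) (n : Int) :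
    (l.foldl solveAltStep (true, n)).2 = n + countA l := by
  induction l generalizing n with
  | nil => simp [countA]
  | cons c t ih =>
    simp only [List.foldl_cons, solveAltStep]
    rw [countA_cons]
    by_cases h : c = 'A'
    · simp [h, ih]; ring
    · by_cases hb : c = 'B' <;> simp [h, hb, ih]

theorem alt_foldl_false (l : List Char) (n : Int) :
    (l.foldl solveAltStep (false, n)).2 = n + gAfterB l := by
  induction l generalizing n with
  | nil => simp [gAfterB]
  | cons c t ih =>
    simp only [List.foldl_cons, solveAltStep]
    by_cases h : c = 'B'
    · simp [h, gAfterB, alt_foldl_true]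
    · simp [h, gAfterB, ih]

theorem findB_spec (t l : List Char) (a : Int) (ha : 0 ≤ a) (hd : l.drop a.toNat = t) :
    solveFindB l (PySem.List.pyRange a (l.length : Int) 1) =
      (match t.findIdx? (· = 'B') with
       | none => -1
       | some j => a + (j : Int)) := by
  induction t generalizing a with
  | nil =>
    have hlen : l.length ≤ a.toNat := by
      by_contra h
      have := List.drop_eq_nil_iff.mp hd
      omega
    rw [PySem.List.pyRange_one_eq_nil (by omega)]
    simp [solveFindB]
  | cons c t ih =>
    have hlt : a.toNat < l.length := by
      by_contra h
      rw [List.drop_eq_nil_of_le (by omega)] at hd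
      simp at hd
    have haInt : a < (l.length : Int) := by omega
    have hget : l[a.toNat] = c := by
      have h2 := congrArg (fun xs => xs.head?) hd
      simp only [List.head?_drop, List.getElem?_eq_getElem hlt, List.head?_cons] at h2
      simpa using h2
    have hgetD : PySem.List.pyGetD l a ' ' = c := by
      rw [PySem.List.pyGetD_eq_getElem l ' ' ha haInt, hget]
    rw [PySem.List.pyRange_one_cons haInt]
    simp only [solveFindB, hgetD]
    by_cases hc : c = 'B'
    · simp [hc, List.findIdx?_cons]
    · have hd' : l.drop (a + 1).toNat = t := by
        have h3 : (a + 1).toNat = a.toNat + 1 := by omega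
        rw [h3, ← List.drop_drop]
        simp [hd]
      rw [if_neg hc, ih (a + 1) (by omega) hd']
      simp only [List.findIdx?_cons, hc, decide_false]
      cases h : t.findIdx? (· = 'B') with
      | none => simp
      | some j => simp; ring

theorem gAfterB_of_none (l : List Char) (h : l.findIdx? (· = 'B') = none) :
    gAfterB l = 0 := by
  induction l with
  | nil => simp [gAfterB]
  | cons c t ih =>
    simp only [List.findIdx?_cons] at h
    by_cases hc : c = 'B'
    · simp [hc] at h
    · simp only [hc, decide_false] at h
      simp only [gAfterB, hc, if_false]
      exact ih (by cases h' : t.findIdx? (· = 'B') <;> simp [h'] at h ⊢)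

theorem gAfterB_of_some (l : List Char) (j : Nat) (h : l.findIdx? (· = 'B') = some j) :
    gAfterB l = countA (l.drop (j + 1)) := by
  induction l generalizing j with
  | nil => simp at h
  | cons c t ih =>
    simp only [List.findIdx?_cons] at h
    by_cases hc : c = 'B'
    · simp only [hc, decide_true, if_true] at h
      obtain rfl : j = 0 := by simpa using h.symm
      simp [gAfterB, hc]
    · simp only [hc, decide_false] at h
      cases h' : t.findIdx? (· = 'B') with
      | none => simp [h'] at h
      | some j' =>
        rw [h'] at h
        obtain rfl : j = j' + 1 := by simpa using h.symm
        simp only [gAfterB, hc, if_false, List.drop_succ_cons]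
        exact ih j' h'

theorem sum_indicator_list (t : List Char) :
    (t.map (fun c => if c = 'A' then (1 : Int) else 0)).sum = countA t := by
  induction t with
  | nil => simp [countA]
  | cons c t ih => rw [List.map_cons, List.sum_cons, countA_cons, ih]

theorem sum_indicator_drop (l : List Char) (m : Nat) :
    ((PySem.List.pyRange ((m : Int)) (l.length : Int) 1).map
        (fun k => if PySem.List.pyGetD l k ' ' = 'A' then (1 : Int) else 0)).sum
      = countA (l.drop m) := by
  have h1 : (fun k => if PySem.List.pyGetD l k ' ' = 'A' then (1 : Int) else 0)
      = (fun c => if c = 'A' then (1 : Int) else 0) ∘ (fun k => PySem.List.pyGetD l k ' ') := rfl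
  rw [h1, ← List.map_map, PySem.List.map_pyGetD_pyRange' l ' ' (by positivity)]
  simp only [Int.toNat_natCast]
  exact sum_indicator_list _

theorem solve_eq_gAfterB (l : List Char) :
    (let first_b := solveFindB l (PySem.List.pyRange 0 (l.length : Int) 1)
     if first_b = -1 then 0
     else ((PySem.List.pyRange (first_b + 1) (l.length : Int) 1).map
            (fun k => if PySem.List.pyGetD l k ' ' = 'A' then (1 : Int) else 0)).sum)
      = gAfterB l := by
  have hfind := findB_spec l l 0 le_rfl (by simp)
  cases h : l.findIdx? (· = 'B') with
  | none =>
    rw [h] at hfind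
    simp only [hfind]
    simp [gAfterB_of_none l h]
  | some j =>
    rw [h] at hfind
    simp only [hfind, zero_add]
    have hne : ((j : Int)) ≠ -1 := by omega
    rw [if_neg hne]
    have h4 : ((j : Int) + 1) = ((j + 1 : Nat) : Int) := by push_cast; ring
    rw [h4, sum_indicator_drop l (j + 1), gAfterB_of_some l j h]

-- ===== VERDICT (by name: the statement is the Claim_ definition above) =====
theorem solve_spec : Claim_equal_solve := by
  intro s _
  unfold Spec_solve solve solve_alt
  rw [alt_foldl_false, zero_add]
  exact solve_eq_gAfterB s.toList
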